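-- pv_equiv track=rewrite | github.com/jdold07/codewars-solutions | 6_Kyu_Kata/smallest-permutation/Python/smallest_permutation_test.py | solution
-- ===== SOURCE A (Python) =====
-- def solution(n):
--     if n >= 0 and type(n) == int:
--         sortedDigits = sorted([int(digit) for digit in str(n)])
--     else:
--         sortedDigits = sorted([int(digit) for digit in str(n)[1:]])
--     hasLeadingZeros = True
--     for index in range(len(sortedDigits)):
--         if sortedDigits[index] != 0 and hasLeadingZeros:
--             firstNonZero =  sortedDigits[index]
--             sortedDigits.pop(index)
--             sortedDigits.insert(0, firstNonZero)
--             hasLeadingZeros = False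
--     if n >= 0 and type(n) == int:
--         return int("".join([str(digit) for digit in sortedDigits]))
--     else:
--         sortedDigits.insert(0, "-")
--         return int("".join([str(digit) for digit in sortedDigits]))
-- ===== SOURCE B (Python) =====
-- def solution(n):
--     # counting-sort construction: tally digits, emit smallest nonzero digit first,
--     # then all zeros, then the remaining digits in ascending order (no sort, no pop/insert)
--     if n >= 0 and type(n) == int:
--         s = str(n)
--     else:
--         s = str(n)[1:]
--     cnt = [0] * 10
--     for ch in s:
--         cnt[int(ch)] += 1
--     digits = []
--     for d in range(1, 10):
--         if cnt[d]:
--             digits.append(d)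
--             cnt[d] -= 1
--             break
--     for d in range(10):
--         digits.extend([d] * cnt[d])
--     body = "".join(str(d) for d in digits)
--     if n >= 0 and type(n) == int:
--         return int(body)
--     else:
--         return int("-" + body)
-- ===== Notes on version B (the rewrite author's own statement) =====
-- stated objective: alternative
-- what changed: replaces comparison sort plus a first-nonzero pop/insert index loop with a per-digit tally and a direct counting construction (smallest nonzero digit first, then the zeros, then the remaining digits in ascending order)
import Mathlib
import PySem

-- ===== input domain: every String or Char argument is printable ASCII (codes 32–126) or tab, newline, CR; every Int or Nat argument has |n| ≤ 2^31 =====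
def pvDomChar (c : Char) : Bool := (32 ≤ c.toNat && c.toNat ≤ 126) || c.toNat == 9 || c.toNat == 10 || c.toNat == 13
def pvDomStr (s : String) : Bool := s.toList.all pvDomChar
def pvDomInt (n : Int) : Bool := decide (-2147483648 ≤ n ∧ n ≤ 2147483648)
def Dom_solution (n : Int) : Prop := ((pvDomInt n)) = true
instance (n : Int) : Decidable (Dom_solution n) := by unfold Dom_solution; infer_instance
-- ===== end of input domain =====

-- B replaces A's sort + first-nonzero pop/insert loop by a digit tally and a direct counting construction; same results, no speed claim.

-- int(ch) for a single decimal digit character (both Pythons apply int() only to digit chars of str(n), where it never raises)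
def pyDigitVal (c : Char) : Int := (PySem.Int.ofChars? [c]).getD 0

-- ===== PORT A =====
-- loop body: 'if sortedDigits[index] != 0 and hasLeadingZeros: firstNonZero = sortedDigits[index]; pop(index); insert(0, firstNonZero)'
def stepA (st : List Int × Bool) (index : Int) : List Int × Bool :=
  if (PySem.List.pyGetD st.1 index 0 != 0) && st.2 then
    let firstNonZero := PySem.List.pyGetD st.1 index 0
    let popped := ((PySem.List.pop? st.1 index).map Prod.snd).getD st.1
    (PySem.List.insert popped 0 firstNonZero, false)
  else st

def solution (n : Int) : Int :=
  let sortedDigits : List Int :=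
    if 0 ≤ n then
      PySem.List.sorted ((PySem.Int.toChars n).map pyDigitVal) (fun x => x)
    else
      PySem.List.sorted ((PySem.List.slice (PySem.Int.toChars n) (some 1) none).map pyDigitVal) (fun x => x)
  let final := (PySem.List.pyRange 0 (sortedDigits.length : Int) 1).foldl stepA (sortedDigits, true)
  if 0 ≤ n then
    (PySem.Int.ofChars? ((final.1.map PySem.Int.toChars).flatten)).getD 0
  else
    (PySem.Int.ofChars? ((['-'] :: final.1.map PySem.Int.toChars).flatten)).getD 0

-- ===== PORT B =====
-- 'for ch in s: cnt[int(ch)] += 1'  (indices are always 0..9 here, so list-set at toNat is exact)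
def cntStep (cnt : List Int) (ch : Char) : List Int :=
  cnt.set (pyDigitVal ch).toNat (PySem.List.pyGetD cnt (pyDigitVal ch) 0 + 1)

def solution_alt (n : Int) : Int :=
  let s : List Char :=
    if 0 ≤ n then PySem.Int.toChars n else PySem.List.slice (PySem.Int.toChars n) (some 1) none
  let cnt : List Int := s.foldl cntStep (List.replicate 10 0)
  -- 'for d in range(1,10): if cnt[d]: digits.append(d); cnt[d] -= 1; break'  = first d in 1..9 with cnt[d] ≠ 0
  let lead := (PySem.List.pyRange 1 10 1).find? (fun d => PySem.List.pyGetD cnt d 0 != 0)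
  let dc : List Int × List Int :=
    match lead with
    | some d => ([d], cnt.set d.toNat (PySem.List.pyGetD cnt d 0 - 1))
    | none => ([], cnt)
  let digits := (PySem.List.pyRange 0 10 1).foldl
    (fun acc d => acc ++ List.replicate (PySem.List.pyGetD dc.2 d 0).toNat d) dc.1
  let body := (digits.map PySem.Int.toChars).flatten
  if 0 ≤ n then (PySem.Int.ofChars? body).getD 0
  else (PySem.Int.ofChars? ('-' :: body)).getD 0

-- ===== PRECONDITION & SPEC =====
def Spec_solution (n : Int) (out : Int) : Prop := out = solution_alt n
instance (n : Int) (out : Int) : Decidable (Spec_solution n out) := by unfold Spec_solution; infer_instance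

-- ===== CLAIM (what is proved, stated in full; the proofs are below) =====
def Claim_equal_solution : Prop := ∀ (n : Int), Dom_solution n → Spec_solution n (solution n)

-- ===== LEMMAS AND PROOFS =====

def digitChars : List Char := ['0','1','2','3','4','5','6','7','8','9']

lemma digitChar_mem (k : Nat) (h : k < 10) : k.digitChar ∈ digitChars := by
  interval_cases k <;> decide

lemma toDigitsCore_mem (fuel : Nat) : ∀ (m : Nat) (ds : List Char),
    (∀ c ∈ ds, c ∈ digitChars) → ∀ c ∈ Nat.toDigitsCore 10 fuel m ds, c ∈ digitChars := by
  induction fuel with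
  | zero => intro m ds h c hc; rw [Nat.toDigitsCore] at hc; exact h c hc
  | succ fuel ih =>
      intro m ds h c hc
      rw [Nat.toDigitsCore] at hc
      have hd : ∀ c ∈ (m % 10).digitChar :: ds, c ∈ digitChars := by
        intro c hc
        rcases List.mem_cons.1 hc with rfl | hc
        · exact digitChar_mem _ (Nat.mod_lt _ (by omega))
        · exact h c hc
      by_cases h0 : m / 10 = 0
      · simp only [h0] at hc; exact hd c hc
      · simp only [if_neg h0] at hc; exact ih _ _ hd c hc
lemma toDigits_mem (m : Nat) : ∀ c ∈ Nat.toDigits 10 m, c ∈ digitChars := by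
  exact toDigitsCore_mem (m + 1) m [] (by simp)

lemma pyDigitVal_bound (c : Char) (h : c ∈ digitChars) : 0 ≤ pyDigitVal c ∧ pyDigitVal c < 10 := by
  fin_cases h <;> decide

lemma replicate_getD (j : Nat) (hj : j < 10) :
    PySem.List.pyGetD (List.replicate 10 (0:Int)) (j : Int) 0 = 0 := by
  rw [PySem.List.pyGetD_natCast]
  rw [List.getD_eq_getElem _ _ (by simpa using hj)]
  have h2 : (List.replicate 10 (0:Int))[j]'(by simpa using hj) ∈ List.replicate 10 (0:Int) :=
    List.getElem_mem _
  exact List.eq_of_mem_replicate h2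

lemma stepA_false (l : List Int) (i : Int) : stepA (l, false) i = (l, false) := by simp [stepA]
lemma foldl_stepA_false (idxs : List Int) (l : List Int) :
    idxs.foldl stepA (l, false) = (l, false) := by
  induction idxs with
  | nil => rfl
  | cons i t ih => simpa [stepA_false] using ih
lemma foldl_stepA_zeros (s : List Int) (idxs : List Int)
    (h : ∀ i ∈ idxs, PySem.List.pyGetD s i 0 = 0) :
    idxs.foldl stepA (s, true) = (s, true) := by
  induction idxs with
  | nil => rfl
  | cons i t ih =>
      have h0 := h i (by simp)
      have hs : stepA (s, true) i = (s, true) := by simp [stepA, h0]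
      rw [List.foldl_cons, hs]
      exact ih (fun j hj => h j (by simp [hj]))

lemma loopA_eq (z t : List Int) (d : Int) (hz : ∀ x ∈ z, x = 0) (hd : d ≠ 0) :
    ((PySem.List.pyRange 0 (((z ++ d :: t).length : Nat) : Int) 1).foldl stepA (z ++ d :: t, true)).1
      = d :: (z ++ t) := by
  have hk : z.length < (z ++ d :: t).length := by simp
  have hsplit : PySem.List.pyRange 0 ((z ++ d :: t).length : Int) 1
      = PySem.List.pyRange 0 (z.length : Int) 1
        ++ PySem.List.pyRange (z.length : Int) ((z ++ d :: t).length : Int) 1 :=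
    PySem.List.pyRange_one_append _ _ _ (by positivity) (by exact_mod_cast Nat.le_of_lt hk)
  have hcons : PySem.List.pyRange (z.length : Int) ((z ++ d :: t).length : Int) 1
      = (z.length : Int) :: PySem.List.pyRange ((z.length : Int) + 1) ((z ++ d :: t).length : Int) 1 :=
    PySem.List.pyRange_one_cons (by exact_mod_cast hk)
  rw [hsplit, List.foldl_append, foldl_stepA_zeros, hcons, List.foldl_cons]
  · have hget : PySem.List.pyGetD (z ++ d :: t) (z.length : Int) 0 = d := by
      rw [PySem.List.pyGetD_eq_getElem _ _ (by positivity) (by exact_mod_cast hk)]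
      simp
    have hpop : PySem.List.pop? (z ++ d :: t) (z.length : Int)
        = some ((z ++ d :: t)[z.length]'hk, (z ++ d :: t).eraseIdx z.length) :=
      PySem.List.pop?_natCast _ z.length hk
    have herase : (z ++ d :: t).eraseIdx z.length = z ++ t := by
      rw [List.eraseIdx_append_of_length_le (le_refl _)]
      simp
    have hstep : stepA (z ++ d :: t, true) (z.length : Int) = (d :: (z ++ t), false) := by
      simp [stepA, hget, hd, hpop, herase, PySem.List.insert_zero]
    rw [hstep, foldl_stepA_false]
  · intro i hi
    rw [PySem.List.mem_pyRange_one] at hi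
    have h1 : i.toNat < z.length := by omega
    rw [PySem.List.pyGetD_eq_getElem _ _ (by omega) (by omega)]
    rw [List.getElem_append_left (by omega)]
    exact hz _ (List.getElem_mem _)

lemma cnt_fold (cs : List Char) (h : ∀ c ∈ cs, c ∈ digitChars) :
    ∀ cnt : List Int, cnt.length = 10 →
      (cs.foldl cntStep cnt).length = 10 ∧
      ∀ j : Nat, j < 10 →
        PySem.List.pyGetD (cs.foldl cntStep cnt) (j : Int) 0
          = PySem.List.pyGetD cnt (j : Int) 0 + ((cs.map pyDigitVal).count (j : Int) : Int) := by
  induction cs with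
  | nil => intro cnt hlen; simp [hlen]
  | cons c cs ih =>
      intro cnt hlen
      obtain ⟨hv0, hv10⟩ := pyDigitVal_bound c (h c (by simp))
      have hlen' : (cntStep cnt c).length = 10 := by simp [cntStep, hlen]
      obtain ⟨hL, hG⟩ := ih (fun x hx => h x (by simp [hx])) (cntStep cnt c) hlen'
      refine ⟨by simpa using hL, ?_⟩
      intro j hj
      rw [List.foldl_cons, hG j hj]
      have hjv : PySem.List.pyGetD (cntStep cnt c) (j : Int) 0
          = PySem.List.pyGetD cnt (j : Int) 0 + (if pyDigitVal c = (j : Int) then 1 else 0) := by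
        rw [PySem.List.pyGetD_eq_getElem _ _ (by positivity) (by rw [hlen']; exact_mod_cast hj),
            PySem.List.pyGetD_eq_getElem _ _ (by positivity) (by rw [hlen]; exact_mod_cast hj)]
        simp only [cntStep, Int.toNat_natCast]
        rw [List.getElem_set]
        by_cases he : pyDigitVal c = (j : Int)
        · rw [if_pos (by omega), if_pos he]
          rw [PySem.List.pyGetD_eq_getElem _ _ hv0 (by rw [hlen]; exact_mod_cast hv10)]
          congr 2
          omega
        · rw [if_neg (by omega), if_neg he]
          omega
      rw [hjv]
      simp only [List.map_cons, List.count_cons]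
      by_cases he : pyDigitVal c = (j : Int)
      · simp [he]
        ring
      · simp [he]

lemma countSort (l : List Int) (hb : ∀ x ∈ l, 0 ≤ x ∧ x < 10)
    (hp : l.Pairwise (· ≤ ·)) :
    (PySem.List.pyRange 0 10 1).flatMap (fun j => List.replicate (l.count j) j) = l := by
  have hperm : ((PySem.List.pyRange 0 10 1).flatMap (fun j => List.replicate (l.count j) j)).Perm l := by
    rw [List.perm_iff_count]
    intro a
    by_cases ha : 0 ≤ a ∧ a < 10
    · have : PySem.List.pyRange 0 10 1
          = PySem.List.pyRange 0 a 1 ++ a :: PySem.List.pyRange (a+1) 10 1 := by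
        rw [PySem.List.pyRange_one_append 0 a 10 ha.1 (by omega), PySem.List.pyRange_one_cons (a := a) (b := 10) (by omega)]
      rw [this]
      rw [List.flatMap_append, List.flatMap_cons, List.count_append, List.count_append]
      have h1 : ∀ js : List Int, a ∉ js → (js.flatMap (fun j => List.replicate (l.count j) j)).count a = 0 := by
        intro js hjs
        rw [List.count_eq_zero]
        intro hmem
        obtain ⟨j, hj, hr⟩ := List.mem_flatMap.1 hmem
        rw [List.mem_replicate] at hr
        exact hjs (hr.2 ▸ hj)
      rw [h1 _ (by rw [PySem.List.mem_pyRange_one]; omega),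
          h1 _ (by rw [PySem.List.mem_pyRange_one]; omega)]
      simp
    · have hnotmem : a ∉ l := fun hm => ha ⟨(hb a hm).1, (hb a hm).2⟩
      rw [List.count_eq_zero.2 hnotmem, List.count_eq_zero]
      intro hmem
      obtain ⟨j, hj, hr⟩ := List.mem_flatMap.1 hmem
      rw [List.mem_replicate] at hr
      rw [PySem.List.mem_pyRange_one] at hj
      omega
  have hpair : ((PySem.List.pyRange 0 10 1).flatMap (fun j => List.replicate (l.count j) j)).Pairwise (· ≤ ·) := by
    have key : ∀ js : List Int, js.Pairwise (· < ·) →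
        (js.flatMap (fun j => List.replicate (l.count j) j)).Pairwise (· ≤ ·) := by
      intro js hjs
      induction js with
      | nil => simp
      | cons j js ihj =>
          rw [List.flatMap_cons, List.pairwise_append]
          refine ⟨List.pairwise_replicate.2 (Or.inr le_rfl), ihj (List.Pairwise.sublist (List.sublist_cons_self _ _) hjs), ?_⟩
          intro x hx y hy
          rw [List.mem_replicate] at hx
          obtain ⟨j', hj', hr⟩ := List.mem_flatMap.1 hy
          rw [List.mem_replicate] at hr
          have := (List.pairwise_cons.1 hjs).1 j' hj'
          omega
    exact key _ (PySem.List.pairwise_lt_pyRange_one 0 10)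
  calc (PySem.List.pyRange 0 10 1).flatMap (fun j => List.replicate (l.count j) j)
      = PySem.List.sorted l (fun x => x) := (PySem.List.sorted_id_eq_of_perm_of_pairwise _ _ hperm hpair).symm
    _ = l := PySem.List.sorted_eq_self_of_pairwise _ _ hp

lemma main_eq (cs : List Char) (h : ∀ c ∈ cs, c ∈ digitChars) :
    (let s := PySem.List.sorted (cs.map pyDigitVal) (fun x => x)
     ((PySem.List.pyRange 0 (s.length : Int) 1).foldl stepA (s, true)).1)
    = (let cnt := cs.foldl cntStep (List.replicate 10 0)
       let lead := (PySem.List.pyRange 1 10 1).find? (fun d => PySem.List.pyGetD cnt d 0 != 0)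
       let dc : List Int × List Int :=
         match lead with
         | some d => ([d], cnt.set d.toNat (PySem.List.pyGetD cnt d 0 - 1))
         | none => ([], cnt)
       (PySem.List.pyRange 0 10 1).foldl
         (fun acc d => acc ++ List.replicate (PySem.List.pyGetD dc.2 d 0).toNat d) dc.1) := by
  -- notation
  set l : List Int := cs.map pyDigitVal with hl
  have hlb : ∀ x ∈ l, 0 ≤ x ∧ x < 10 := by
    intro x hx
    obtain ⟨c, hc, rfl⟩ := List.mem_map.1 hx
    exact pyDigitVal_bound c (h c hc)
  set s : List Int := PySem.List.sorted l (fun x => x) with hsdef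
  have hsp : s.Pairwise (· ≤ ·) := PySem.List.sorted_pairwise l (fun x => x)
  have hsperm : s.Perm l := PySem.List.sorted_perm l (fun x => x) false
  have hsb : ∀ x ∈ s, 0 ≤ x ∧ x < 10 := fun x hx => hlb x (hsperm.mem_iff.1 hx)
  -- counts
  set cnt : List Int := cs.foldl cntStep (List.replicate 10 0) with hcntdef
  obtain ⟨hcl, hcv⟩ := cnt_fold cs h (List.replicate 10 0) (by simp)
  have hcnt : ∀ j : Int, 0 ≤ j → j < 10 → PySem.List.pyGetD cnt j 0 = (s.count j : Int) := by
    intro j h0 h10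
    have hj : j = ((j.toNat : Nat) : Int) := by omega
    rw [hj, hcv j.toNat (by omega), replicate_getD j.toNat (by omega)]
    rw [show List.count ((j.toNat : Nat) : Int) (List.map pyDigitVal cs) = List.count ((j.toNat : Nat) : Int) l from rfl,
        ← hsperm.count_eq]
    simp
  -- case split on the sorted digits
  rcases hdw : s.dropWhile (fun x => x == 0) with _ | ⟨d, t2⟩
  · -- all digits are zero
    have hall : ∀ x ∈ s, x = 0 := by
      intro x hx
      have : s.takeWhile (fun x => x == 0) = s := by
        have := List.takeWhile_append_dropWhile (p := fun x : Int => x == 0) (l := s)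
        rw [hdw] at this; simpa using this
      rw [← this] at hx
      simpa using List.mem_takeWhile_imp hx
    have hA : ((PySem.List.pyRange 0 (s.length : Int) 1).foldl stepA (s, true)).1 = s := by
      rw [foldl_stepA_zeros]
      intro i hi
      rw [PySem.List.mem_pyRange_one] at hi
      rw [PySem.List.pyGetD_eq_getElem _ _ (by omega) (by exact_mod_cast hi.2)]
      exact hall _ (List.getElem_mem _)
    have hfind : (PySem.List.pyRange 1 10 1).find? (fun d => PySem.List.pyGetD cnt d 0 != 0) = none := by
      rw [List.find?_eq_none]
      intro e he
      rw [PySem.List.mem_pyRange_one] at he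
      have hce : s.count e = 0 := by
        rw [List.count_eq_zero]
        intro hmem
        have := hall e hmem; omega
      simp [hcnt e (by omega) (by omega), hce]
    simp only [hfind]
    rw [hA, PySem.List.foldl_append_eq_flatMap]
    rw [List.flatMap_congr (g := fun j => List.replicate (s.count j) j) ?_]
    · rw [countSort s hsb hsp]; rfl
    · intro j hj
      rw [PySem.List.mem_pyRange_one] at hj
      rw [hcnt j (by omega) (by omega)]
      simp
  · -- there is a nonzero digit; d is the smallest one
    have hzt : s.takeWhile (fun x => x == 0) ++ d :: t2 = s := by
      have := List.takeWhile_append_dropWhile (p := fun x : Int => x == 0) (l := s)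
      rw [hdw] at this; exact this
    set z : List Int := s.takeWhile (fun x => x == 0) with hzdef
    have hz : ∀ x ∈ z, x = 0 := fun x hx => by simpa using List.mem_takeWhile_imp hx
    have hd0 : d ≠ 0 := by
      have hne : s.dropWhile (fun x => x == 0) ≠ [] := by rw [hdw]; simp
      have := List.head_dropWhile_not (fun x : Int => x == 0) hne
      simp [hdw] at this; exact this
    have hdmem : d ∈ s := by rw [← hzt]; simp
    have hdb : 0 ≤ d ∧ d < 10 := hsb d hdmem
    have hd1 : 1 ≤ d := by omega
    -- pairwise facts
    have hspz : (z ++ d :: t2).Pairwise (· ≤ ·) := hzt.symm ▸ hsp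
    have hdle : ∀ y ∈ t2, d ≤ y := (List.pairwise_cons.1 (List.pairwise_append.1 hspz).2.1).1
    -- A side
    have hA : ((PySem.List.pyRange 0 (s.length : Int) 1).foldl stepA (s, true)).1
        = d :: (z ++ t2) := by
      rw [← hzt]
      exact loopA_eq z t2 d hz hd0
    -- counts of small nonzero digits are zero
    have hcsmall : ∀ e : Int, 1 ≤ e → e < d → s.count e = 0 := by
      intro e he1 hed
      rw [List.count_eq_zero]
      intro hmem
      rw [← hzt] at hmem
      rcases List.mem_append.1 hmem with hmz | hmc
      · have := hz e hmz; omega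
      · rcases List.mem_cons.1 hmc with rfl | hmt
        · omega
        · have := hdle e hmt; omega
    -- B: the break loop finds d
    have hfind : (PySem.List.pyRange 1 10 1).find? (fun e => PySem.List.pyGetD cnt e 0 != 0) = some d := by
      have hsplit : PySem.List.pyRange 1 10 1
          = PySem.List.pyRange 1 d 1 ++ PySem.List.pyRange d 10 1 :=
        PySem.List.pyRange_one_append 1 d 10 (by omega) (by omega)
      have hcons : PySem.List.pyRange d 10 1 = d :: PySem.List.pyRange (d+1) 10 1 :=
        PySem.List.pyRange_one_cons (a := d) (b := 10) (by omega)
      rw [hsplit, hcons, List.find?_append]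
      have hnone : (PySem.List.pyRange 1 d 1).find? (fun e => PySem.List.pyGetD cnt e 0 != 0) = none := by
        rw [List.find?_eq_none]
        intro e he
        rw [PySem.List.mem_pyRange_one] at he
        simp [hcnt e (by omega) (by omega), hcsmall e (by omega) (by omega)]
      have hpos : (fun e => PySem.List.pyGetD cnt e 0 != 0) d = true := by
        have : s.count d ≠ 0 := by
          rw [Ne, List.count_eq_zero]; exact fun hc => hc hdmem
        simp [hcnt d (by omega) (by omega), this]
      rw [hnone, Option.none_or]
      exact List.find?_cons_of_pos hpos
    simp only [hfind]
    rw [hA, PySem.List.foldl_append_eq_flatMap]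
    -- the decremented counts are the counts of z ++ t2
    have hcnt2 : ∀ j : Int, j ∈ PySem.List.pyRange 0 10 1 →
        List.replicate (PySem.List.pyGetD (cnt.set d.toNat (PySem.List.pyGetD cnt d 0 - 1)) j 0).toNat j
          = List.replicate ((z ++ t2).count j) j := by
      intro j hj
      rw [PySem.List.mem_pyRange_one] at hj
      have hcount : s.count j = (z ++ t2).count j + (if d = j then 1 else 0) := by
        rw [← hzt, List.count_append, List.count_append, List.count_cons]
        simp [beq_iff_eq]
        split_ifs <;> omega
      have hget : PySem.List.pyGetD (cnt.set d.toNat (PySem.List.pyGetD cnt d 0 - 1)) j 0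
          = if d.toNat = j.toNat then (s.count d : Int) - 1 else (s.count j : Int) := by
        rw [PySem.List.pyGetD_eq_getElem _ _ (by omega) (by rw [List.length_set]; rw [← hcntdef] at hcl; rw [hcl]; omega)]
        rw [List.getElem_set]
        rw [hcnt d (by omega) (by omega)]
        split_ifs with hdj
        · rfl
        · rw [← hcnt j (by omega) (by omega)]
          rw [PySem.List.pyGetD_eq_getElem _ _ (by omega) (by rw [← hcntdef] at hcl; rw [hcl]; omega)]
      rw [hget]
      congr 1
      by_cases hdj : d = j
      · subst hdj
        rw [if_pos rfl, hcount]
        simp [List.count_append]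
        omega
      · rw [if_neg (by omega), hcount, if_neg hdj]
        simp [List.count_append]
        omega
    rw [List.flatMap_congr hcnt2]
    have hztb : ∀ x ∈ z ++ t2, 0 ≤ x ∧ x < 10 := by
      intro x hx
      apply hsb
      rw [← hzt]
      rcases List.mem_append.1 hx with h1 | h2
      · exact List.mem_append.2 (Or.inl h1)
      · exact List.mem_append.2 (Or.inr (List.mem_cons.2 (Or.inr h2)))
    have hztp : (z ++ t2).Pairwise (· ≤ ·) :=
      List.Pairwise.sublist (List.Sublist.append (List.Sublist.refl z) (List.sublist_cons_self d t2)) hspz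
    rw [countSort (z ++ t2) hztb hztp]
    rfl

lemma chars_mem (n : Int) :
    ∀ c ∈ (if 0 ≤ n then PySem.Int.toChars n
           else PySem.List.slice (PySem.Int.toChars n) (some 1) none), c ∈ digitChars := by
  by_cases h0 : 0 ≤ n
  · rw [if_pos h0]
    have : PySem.Int.toChars n = Nat.toDigits 10 n.toNat := by
      simp [PySem.Int.toChars, show ¬ n < 0 by omega]
    rw [this]; exact toDigits_mem _
  · rw [if_neg h0]
    have : PySem.Int.toChars n = '-' :: Nat.toDigits 10 n.natAbs := by
      simp [PySem.Int.toChars, show n < 0 by omega]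
    rw [this, PySem.List.slice_from _ (by norm_num)]
    simpa using toDigits_mem n.natAbs


lemma solution_eq_alt (n : Int) : solution n = solution_alt n := by
  have key := main_eq
    (if 0 ≤ n then PySem.Int.toChars n
     else PySem.List.slice (PySem.Int.toChars n) (some 1) none) (chars_mem n)
  simp only at key
  by_cases h0 : 0 ≤ n
  · rw [if_pos h0] at key
    simp only [solution, solution_alt, if_pos h0]
    rw [key]
  · rw [if_neg h0] at key
    simp only [solution, solution_alt, if_neg h0]
    rw [key]
    simp [List.flatten_cons]

-- ===== VERDICT (by name: the statement is the Claim_ definition above) =====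
theorem solution_spec : Claim_equal_solution := by
  intro n _
  unfold Spec_solution
  exact solution_eq_alt n
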